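-- pv_equiv track=rewrite | github.com/samuelmf1/track-cas13 | src/offtarget_filter_cigar.py | valid_indel_positions
-- ===== SOURCE A (Python) =====
-- from typing import List, Tuple, Dict
--
-- def valid_indel_positions(positions: List[Tuple[str, int, int]], debug: bool = False) -> Tuple[bool, str]:
--     """
--     Returns True if all insertions/deletions occur only at positions <=3 or >=21,
--     allowing up to 2 consecutive indels of the same type.
--     """
--     i = 0
--     n = len(positions)
--
--     while i < n:
--         op, start, _ = positions[i]
--         if op in ("I", "D"):
--             run_positions = [start]
--             j = i + 1
--             while j < n and positions[j][0] == op: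
--                 run_positions.append(positions[j][1])
--                 j += 1
--
--             # More than 2 consecutive I/D is invalid
--             if len(run_positions) > 2:
--                 reason = f"{op} run too long at positions {run_positions}"
--                 return False, reason if debug else ""
--
--             # All positions in run must be <=3 or >=21
--             if any(pos > 3 and pos < 21 for pos in run_positions):
--                 reason = f"{op} at invalid position(s) {run_positions}"
--                 return False, reason if debug else ""
--
--             i = j
--         else:
--             i += 1
--
--     return True, ""
-- ===== SOURCE B (Python) =====
-- from typing import List, Tuple, Optional
--
-- def _run_problem(op: Optional[str], run: List[int]) -> Optional[str]:
--     """Full reason string if a completed run of `op` at positions `run` is invalid, else None."""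
--     if op in ("I", "D"):
--         if len(run) > 2:
--             return f"{op} run too long at positions {run}"
--         if any(3 < p < 21 for p in run):
--             return f"{op} at invalid position(s) {run}"
--     return None
--
-- def valid_indel_positions(positions: List[Tuple[str, int, int]], debug: bool = False) -> Tuple[bool, str]:
--     cur_op: Optional[str] = None
--     cur_run: List[int] = []
--     for op, start, _ in positions:
--         if op == cur_op:
--             cur_run.append(start)
--         else:
--             reason = _run_problem(cur_op, cur_run)
--             if reason is not None:
--                 return False, reason if debug else ""
--             cur_op, cur_run = op, [start]
--     reason = _run_problem(cur_op, cur_run)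
--     if reason is not None:
--         return False, reason if debug else ""
--     return True, ""
-- ===== Notes on version B (the rewrite author's own statement) =====
-- stated objective: simpler
-- what changed: Replaced A's nested index-based while loops (outer scan plus an inner scan that collects each indel run) by a single linear for-pass that carries the current op and run as accumulator state and validates each run when the op changes, with the run checks factored into one helper.
import Mathlib
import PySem

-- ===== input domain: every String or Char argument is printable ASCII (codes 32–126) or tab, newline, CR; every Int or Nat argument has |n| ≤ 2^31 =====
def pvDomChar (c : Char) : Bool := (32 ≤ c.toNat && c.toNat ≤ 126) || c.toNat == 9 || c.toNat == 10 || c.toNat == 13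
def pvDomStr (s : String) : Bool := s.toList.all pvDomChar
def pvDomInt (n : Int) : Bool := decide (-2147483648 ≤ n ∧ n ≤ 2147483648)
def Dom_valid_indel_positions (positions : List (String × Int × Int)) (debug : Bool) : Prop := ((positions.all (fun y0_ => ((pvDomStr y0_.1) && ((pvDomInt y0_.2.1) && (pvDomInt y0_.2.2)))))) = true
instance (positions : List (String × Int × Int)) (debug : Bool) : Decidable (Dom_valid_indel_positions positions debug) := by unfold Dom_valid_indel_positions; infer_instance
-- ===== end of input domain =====

-- B replaces A's nested index-based while loops (outer scan + inner run-collecting scan)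
-- by a single linear pass carrying the current run as accumulator state; objective: simpler.

-- f"{xs}" for a Python list of ints (shared formatting primitive of both ports)
def pvListRepr (xs : List Int) : String := "[" ++ String.intercalate ", " (xs.map PySem.Int.toStr) ++ "]"

-- ===== PORT A =====
-- inner while loop: collect positions[j][1] while positions[j][0] == op; returns (collected, remaining suffix)
def pvTakeRun (op : String) : List (String × Int × Int) → List Int × List (String × Int × Int)
  | [] => ([], [])
  | (o, s, t) :: rest =>
    if o == op then
      let r := pvTakeRun op rest
      (s :: r.1, r.2)
    else ([], (o, s, t) :: rest)

theorem pvTakeRun_len (op : String) : ∀ xs : List (String × Int × Int), (pvTakeRun op xs).2.length ≤ xs.length := by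
  intro xs
  induction xs with
  | nil => simp [pvTakeRun]
  | cons h t ih =>
    obtain ⟨o, s, u⟩ := h
    simp only [pvTakeRun]
    split
    · simpa using Nat.le_succ_of_le ih
    · simp

-- outer while loop over the suffix from index i
def pvLoopA (debug : Bool) : List (String × Int × Int) → Bool × String
  | [] => (true, "")
  | (op, start, _t) :: rest =>
    if op == "I" || op == "D" then
      let run_positions := start :: (pvTakeRun op rest).1
      if run_positions.length > 2 then
        (false, if debug then op ++ " run too long at positions " ++ pvListRepr run_positions else "")
      else if run_positions.any (fun p => decide (3 < p) && decide (p < 21)) then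
        (false, if debug then op ++ " at invalid position(s) " ++ pvListRepr run_positions else "")
      else pvLoopA debug (pvTakeRun op rest).2
    else pvLoopA debug rest
termination_by xs => xs.length
decreasing_by
  · exact Nat.lt_succ_of_le (pvTakeRun_len _ _)
  · simp

def valid_indel_positions (positions : List (String × Int × Int)) (debug : Bool) : Bool × String :=
  pvLoopA debug positions

-- ===== PORT B =====
-- _run_problem helper of Source B
def pvRunProblem (op : Option String) (run : List Int) : Option String :=
  match op with
  | some o =>
    if o == "I" || o == "D" then
      if run.length > 2 then some (o ++ " run too long at positions " ++ pvListRepr run)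
      else if run.any (fun p => decide (3 < p) && decide (p < 21)) then some (o ++ " at invalid position(s) " ++ pvListRepr run)
      else none
    else none
  | none => none

-- the single for loop of Source B, state = (current op, current run)
def pvLoopB (debug : Bool) (cur : Option String) (run : List Int) : List (String × Int × Int) → Bool × String
  | [] =>
    match pvRunProblem cur run with
    | some r => (false, if debug then r else "")
    | none => (true, "")
  | (op, start, _t) :: rest =>
    if some op == cur then pvLoopB debug cur (run ++ [start]) rest
    else
      match pvRunProblem cur run with
      | some r => (false, if debug then r else "")
      | none => pvLoopB debug (some op) [start] rest

def valid_indel_positions_alt (positions : List (String × Int × Int)) (debug : Bool) : Bool × String :=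
  pvLoopB debug none [] positions

-- ===== PRECONDITION & SPEC =====
def Spec_valid_indel_positions (positions : List (String × Int × Int)) (debug : Bool) (out : Bool × String) : Prop := out = valid_indel_positions_alt positions debug
instance (positions : List (String × Int × Int)) (debug : Bool) (out : Bool × String) : Decidable (Spec_valid_indel_positions positions debug out) := by unfold Spec_valid_indel_positions; infer_instance

-- ===== CLAIM (what is proved, stated in full; the proofs are below) =====
def Claim_equal_valid_indel_positions : Prop := ∀ (positions : List (String × Int × Int)) (debug : Bool), Dom_valid_indel_positions positions debug → Spec_valid_indel_positions positions debug (valid_indel_positions positions debug)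

-- ===== LEMMAS AND PROOFS =====

-- A steps one-by-one over a run of a non-indel op; skipping the whole run at once is the same.
theorem pvSkip (debug : Bool) (op : String) (h : (op == "I" || op == "D") = false) :
    ∀ xs : List (String × Int × Int), pvLoopA debug (pvTakeRun op xs).2 = pvLoopA debug xs := by
  intro xs
  induction xs with
  | nil => simp [pvTakeRun]
  | cons hd t ih =>
    obtain ⟨o, s, u⟩ := hd
    by_cases ho : (o == op) = true
    · have heq : o = op := eq_of_beq ho
      subst heq
      simp only [pvTakeRun, ho, if_pos]
      rw [ih]
      simp [pvLoopA, h]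
    · simp [pvTakeRun, ho]

-- unfolding A's outer loop on a cons, phrased through pvRunProblem
theorem pvUnfoldA (debug : Bool) (o : String) (s : Int) (t : Int) (rest : List (String × Int × Int)) :
    pvLoopA debug ((o, s, t) :: rest) =
      match pvRunProblem (some o) (s :: (pvTakeRun o rest).1) with
      | some r => (false, if debug then r else "")
      | none => pvLoopA debug (pvTakeRun o rest).2 := by
  by_cases h : (o == "I" || o == "D") = true
  · simp only [pvLoopA, pvRunProblem, h, if_pos]
    split <;> split <;> simp_all
  · have h' : (o == "I" || o == "D") = false := by simpa using h
    simp only [pvLoopA, pvRunProblem, h', if_neg, Bool.false_eq_true, not_false_iff]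
    rw [pvSkip debug o h' rest]

-- B's loop with a pending run equals: finish the run via A's inner scan, validate, continue with A.
theorem pvKey (debug : Bool) :
    ∀ (xs : List (String × Int × Int)) (op : String) (run : List Int),
      pvLoopB debug (some op) run xs =
        match pvRunProblem (some op) (run ++ (pvTakeRun op xs).1) with
        | some r => (false, if debug then r else "")
        | none => pvLoopA debug (pvTakeRun op xs).2 := by
  intro xs
  induction xs with
  | nil => intro op run; simp only [pvLoopB, pvTakeRun, List.append_nil]; split <;> simp [pvLoopA]
  | cons hd rest ih =>
    intro op run
    obtain ⟨o, s, u⟩ := hd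
    by_cases ho : (o == op) = true
    · have heq : o = op := eq_of_beq ho
      subst heq
      have hc : (some o == some o) = true := by simp
      simp only [pvLoopB, pvTakeRun, ho, if_pos, hc]
      rw [ih o (run ++ [s])]
      simp
    · have hne : ¬ o = op := fun h => ho (by simp [h])
      have hc : (some o == some op) = false := by simp [hne]
      simp only [pvLoopB, pvTakeRun, ho, if_neg, Bool.false_eq_true, not_false_iff, hc]
      rw [ih o [s]]
      simp only [List.singleton_append, List.append_nil, ← pvUnfoldA debug o s u rest]

-- ===== VERDICT (by name: the statement is the Claim_ definition above) =====
theorem valid_indel_positions_spec : Claim_equal_valid_indel_positions := by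
  intro positions debug _
  unfold Spec_valid_indel_positions valid_indel_positions valid_indel_positions_alt
  cases positions with
  | nil => simp [pvLoopA, pvLoopB, pvRunProblem]
  | cons hd rest =>
    obtain ⟨o, s, u⟩ := hd
    have hc : (some o == (none : Option String)) = false := by simp
    simp only [pvLoopB, hc, Bool.false_eq_true, if_neg, not_false_iff, pvRunProblem]
    rw [pvKey debug rest o [s]]
    simp only [List.singleton_append, ← pvUnfoldA debug o s u rest]
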